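-- pv_equiv track=rewrite | github.com/Archana802/quest_python | Day6/p1.py | check_parentheses
-- ===== SOURCE A (Python) =====
-- def check_parentheses(s):
--     open_count = 0
--     pairs_count = 0
--
--     for char in s:
--         if char == '(':
--             open_count += 1
--         elif char == ')':
--             if open_count > 0:
--                 open_count -= 1
--                 pairs_count += 1
--             else:
--                 return "Improper arrangement"
--
--
--     if open_count == 0:
--         return f"{pairs_count} pairs"
--     else:
--         return "Improper arrangement"
-- ===== SOURCE B (Python) =====
-- def check_parentheses(s):
--     # Iterated cancellation: keep only parentheses, then repeatedly delete
--     # adjacent "()" pairs in scanning passes; the string is balanced iff the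
--     # residue is empty, and the matched pairs are exactly the deletions.
--     t = [c for c in s if c in '()']
--     pairs = 0
--     while True:
--         reduced = []
--         removed = 0
--         i = 0
--         while i < len(t):
--             if i + 1 < len(t) and t[i] == '(' and t[i + 1] == ')':
--                 removed += 1
--                 i += 2
--             else:
--                 reduced.append(t[i])
--                 i += 1
--         if removed == 0:
--             break
--         pairs += removed
--         t = reduced
--     return f"{pairs} pairs" if not t else "Improper arrangement"
-- ===== Notes on version B (the rewrite author's own statement) =====
-- stated objective: alternative
-- what changed: B replaces A's single-pass open/pairs counter with an iterated-cancellation algorithm: filter the string to its parentheses, then repeatedly scan and delete adjacent '()' pairs, counting deletions; balanced iff the residue is empty and the pair total is the number of deletions.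
import Mathlib
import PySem

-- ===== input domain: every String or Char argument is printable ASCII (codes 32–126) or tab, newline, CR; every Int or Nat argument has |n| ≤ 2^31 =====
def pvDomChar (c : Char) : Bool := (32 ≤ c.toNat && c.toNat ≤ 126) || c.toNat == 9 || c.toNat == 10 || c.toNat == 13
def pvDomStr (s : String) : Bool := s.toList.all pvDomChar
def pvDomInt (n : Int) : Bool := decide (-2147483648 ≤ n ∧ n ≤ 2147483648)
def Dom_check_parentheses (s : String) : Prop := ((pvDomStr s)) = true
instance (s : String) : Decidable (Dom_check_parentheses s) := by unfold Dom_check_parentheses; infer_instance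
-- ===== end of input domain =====

-- B is an alternative algorithm (iterated cancellation of adjacent "()" pairs), same results, not faster.

-- ===== PORT A =====
-- fused loop: open_count and pairs_count maintained together (transliteration of A)
def checkParensGoA : List Char → Int → Int → String
  | [], oc, pc => if oc = 0 then PySem.Int.toStr pc ++ " pairs" else "Improper arrangement"
  | c :: cs, oc, pc =>
      if c = '(' then checkParensGoA cs (oc + 1) pc
      else if c = ')' then
        if oc > 0 then checkParensGoA cs (oc - 1) (pc + 1)
        else "Improper arrangement"
      else checkParensGoA cs oc pc

def check_parentheses (s : String) : String := checkParensGoA s.toList 0 0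

-- ===== PORT B =====
-- one scanning pass of Source B's inner while loop: delete adjacent "()" pairs,
-- returning the reduced list and the number removed
def passB : List Char → List Char × Int
  | [] => ([], 0)
  | [c] => ([c], 0)
  | c :: d :: rest =>
      if c = '(' ∧ d = ')' then
        ((passB rest).1, (passB rest).2 + 1)
      else
        (c :: (passB (d :: rest)).1, (passB (d :: rest)).2)

-- a pass that removes something shrinks the list (needed for the outer loop's termination)
lemma passB_length : ∀ t : List Char, (passB t).2 ≠ 0 → (passB t).1.length < t.length := by
  have hle : ∀ u : List Char, (passB u).1.length ≤ u.length := by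
    intro u
    induction u using passB.induct with
    | case1 => simp [passB]
    | case2 c => simp [passB]
    | case3 c d rest h ih => simp [passB, h] at ih ⊢; omega
    | case4 c d rest h ih => simp [passB, h] at ih ⊢; omega
  intro t
  induction t using passB.induct with
  | case1 => simp [passB]
  | case2 c => simp [passB]
  | case3 c d rest h ih =>
      intro _
      have := hle rest
      simp [passB, h]; omega
  | case4 c d rest h ih =>
      intro hk
      simp only [passB, if_neg h] at hk ⊢
      have := ih hk
      simp at this ⊢
      omega

-- Source B's outer while loop
def reduceLoopB (t : List Char) (pairs : Int) : List Char × Int :=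
  if (passB t).2 = 0 then (t, pairs)
  else reduceLoopB (passB t).1 (pairs + (passB t).2)
termination_by t.length
decreasing_by exact passB_length t (by assumption)

def check_parentheses_alt (s : String) : String :=
  let t := s.toList.filter (fun c => c == '(' || c == ')')
  let r := reduceLoopB t 0
  if r.1 = [] then PySem.Int.toStr r.2 ++ " pairs" else "Improper arrangement"

-- ===== PRECONDITION & SPEC =====
def Spec_check_parentheses (s : String) (out : String) : Prop := out = check_parentheses_alt s
instance (s : String) (out : String) : Decidable (Spec_check_parentheses s out) := by unfold Spec_check_parentheses; infer_instance

-- ===== CLAIM (what is proved, stated in full; the proofs are below) =====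
def Claim_equal_check_parentheses : Prop := ∀ (s : String), Dom_check_parentheses s → Spec_check_parentheses s (check_parentheses s)

-- ===== LEMMAS AND PROOFS =====

def pvIsParen (c : Char) : Bool := c == '(' || c == ')'

lemma passB_nonneg : ∀ t : List Char, 0 ≤ (passB t).2 := by
  intro t
  induction t using passB.induct with
  | case1 => simp [passB]
  | case2 c => simp [passB]
  | case3 c d rest h ih => simp [passB, h]; omega
  | case4 c d rest h ih => simp [passB, h]; omega

-- A ignores characters other than parentheses
lemma goA_filter : ∀ (cs : List Char) (oc pc : Int),
    checkParensGoA cs oc pc = checkParensGoA (cs.filter pvIsParen) oc pc := by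
  intro cs
  induction cs with
  | nil => intro oc pc; rfl
  | cons c t ih =>
      intro oc pc
      by_cases h1 : c = '('
      · subst h1; simp [checkParensGoA, pvIsParen, List.filter, ih]
      · by_cases h2 : c = ')'
        · subst h2
          simp only [checkParensGoA, pvIsParen, List.filter]
          simp [checkParensGoA, ih]
        · have : pvIsParen c = false := by simp [pvIsParen, h1, h2]
          simp [checkParensGoA, h1, h2, List.filter, this, ih]

-- one-step unfolding of A's loop
lemma goA_cons : ∀ (c : Char) (cs : List Char) (oc pc : Int),
    checkParensGoA (c :: cs) oc pc =
      (if c = '(' then checkParensGoA cs (oc + 1) pc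
       else if c = ')' then
         (if oc > 0 then checkParensGoA cs (oc - 1) (pc + 1) else "Improper arrangement")
       else checkParensGoA cs oc pc) := fun _ _ _ _ => rfl

-- one cancellation pass does not change A's verdict (removed pairs move into pc)
lemma goA_passB : ∀ (t : List Char) (oc pc : Int), 0 ≤ oc →
    checkParensGoA t oc pc = checkParensGoA (passB t).1 oc (pc + (passB t).2) := by
  intro t
  induction t using passB.induct with
  | case1 => intro oc pc _; simp [passB]
  | case2 c => intro oc pc _; simp [passB]
  | case3 c d rest h ih =>
      intro oc pc hoc
      obtain ⟨hc, hd⟩ := h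
      subst hc; subst hd
      rw [show passB ('(' :: ')' :: rest) = ((passB rest).1, (passB rest).2 + 1) from by
        simp [passB]]
      rw [show pc + ((passB rest).2 + 1) = pc + 1 + (passB rest).2 from by ring]
      rw [← ih oc (pc + 1) hoc]
      have e2 : ((')' : Char) = '(') = False := by simp
      have e3 : ((')' : Char) = ')') = True := by simp
      simp only [checkParensGoA, e2, if_false, if_true]
      rw [if_pos (by omega : oc + 1 > 0)]
      rw [show oc + 1 - 1 = oc from by ring]
  | case4 c d rest h ih =>
      intro oc pc hoc
      rw [show passB (c :: d :: rest) = (c :: (passB (d :: rest)).1, (passB (d :: rest)).2) from by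
        simp [passB, h]]
      by_cases h1 : c = '('
      · subst h1
        rw [show checkParensGoA ('(' :: d :: rest) oc pc
              = checkParensGoA (d :: rest) (oc + 1) pc from by rw [goA_cons]; simp]
        rw [show checkParensGoA ('(' :: (passB (d :: rest)).1) oc (pc + (passB (d :: rest)).2)
              = checkParensGoA (passB (d :: rest)).1 (oc + 1) (pc + (passB (d :: rest)).2) from by
          rw [goA_cons]; simp]
        exact ih (oc + 1) pc (by omega)
      · by_cases h2 : c = ')'
        · subst h2
          by_cases h3 : oc > 0
          · rw [show checkParensGoA (')' :: d :: rest) oc pc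
                  = checkParensGoA (d :: rest) (oc - 1) (pc + 1) from by rw [goA_cons]; simp [h3]]
            rw [show checkParensGoA (')' :: (passB (d :: rest)).1) oc (pc + (passB (d :: rest)).2)
                  = checkParensGoA (passB (d :: rest)).1 (oc - 1) (pc + (passB (d :: rest)).2 + 1) from by
              rw [goA_cons]; simp [h3]]
            rw [ih (oc - 1) (pc + 1) (by omega)]
            rw [show pc + 1 + (passB (d :: rest)).2 = pc + (passB (d :: rest)).2 + 1 from by ring]
          · rw [show checkParensGoA (')' :: d :: rest) oc pc = "Improper arrangement" from by
              rw [goA_cons]; simp [h3]]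
            rw [show checkParensGoA (')' :: (passB (d :: rest)).1) oc (pc + (passB (d :: rest)).2)
                  = "Improper arrangement" from by rw [goA_cons]; simp [h3]]
        · rw [show checkParensGoA (c :: d :: rest) oc pc = checkParensGoA (d :: rest) oc pc from by
            rw [goA_cons]; simp [h1, h2]]
          rw [show checkParensGoA (c :: (passB (d :: rest)).1) oc (pc + (passB (d :: rest)).2)
                = checkParensGoA (passB (d :: rest)).1 oc (pc + (passB (d :: rest)).2) from by
            rw [goA_cons]; simp [h1, h2]]
          exact ih oc pc hoc

-- paren-only is preserved by a pass
lemma passB_paren : ∀ t : List Char, t.all pvIsParen → (passB t).1.all pvIsParen := by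
  intro t
  induction t using passB.induct with
  | case1 => simp [passB]
  | case2 c => simp [passB]
  | case3 c d rest h ih =>
      intro hp
      simp only [passB, if_pos h]
      simp only [List.all_cons, Bool.and_eq_true] at hp
      exact ih hp.2.2
  | case4 c d rest h ih =>
      intro hp
      simp only [passB, if_neg h]
      simp only [List.all_cons, Bool.and_eq_true] at hp ⊢
      exact ⟨hp.1, ih (by simp only [List.all_cons, Bool.and_eq_true]; exact hp.2)⟩

-- an irreducible paren-only list starting with '(' is all '('
lemma passB_allOpen : ∀ t : List Char, t.all pvIsParen → (passB t).2 = 0 →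
    ∀ c rest, t = c :: rest → c = '(' → t.all (· == '(') := by
  intro t
  induction t using passB.induct with
  | case1 => intro _ _ c rest h; simp at h
  | case2 c => intro _ _ c' rest h hc; cases h; simp_all
  | case3 c d rest h ih =>
      intro _ hk c' rest' he hc'
      have := passB_nonneg rest
      simp [passB, h] at hk
      omega
  | case4 c d rest h ih =>
      intro hp hk c' rest' he hc'
      cases he
      subst hc'
      simp only [List.all_cons, Bool.and_eq_true] at hp
      have hd : d = '(' := by
        have hdp : d = '(' ∨ d = ')' := by
          have := hp.2.1
          simp [pvIsParen] at this
          exact this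
        rcases hdp with h1 | h1
        · exact h1
        · exact absurd ⟨rfl, h1⟩ h
      subst hd
      have hk' : (passB ('(' :: rest)).2 = 0 := by
        simpa [passB, h] using hk
      have := ih (by simp only [List.all_cons, Bool.and_eq_true]; exact hp.2) hk' '(' rest rfl rfl
      simp only [List.all_cons, Bool.and_eq_true] at this ⊢
      exact ⟨by simp, this⟩

-- A on an all-'(' list never succeeds
lemma goA_allOpen : ∀ (t : List Char) (oc pc : Int), t.all (· == '(') → (t ≠ [] ∨ oc ≠ 0) → 0 ≤ oc →
    checkParensGoA t oc pc = "Improper arrangement" := by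
  intro t
  induction t with
  | nil =>
      intro oc pc _ h hoc
      have : oc ≠ 0 := by tauto
      simp [checkParensGoA, this]
  | cons c rest ih =>
      intro oc pc hall h hoc
      simp only [List.all_cons, Bool.and_eq_true, beq_iff_eq] at hall
      obtain ⟨hc, hrest⟩ := hall
      subst hc
      rw [show checkParensGoA ('(' :: rest) oc pc = checkParensGoA rest (oc + 1) pc from by
        rw [goA_cons]; simp]
      exact ih (oc + 1) pc hrest (Or.inr (by omega)) (by omega)

-- A rejects any nonempty irreducible paren-only list
lemma goA_irreducible : ∀ (t : List Char) (pc : Int), t.all pvIsParen → (passB t).2 = 0 → t ≠ [] →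
    checkParensGoA t 0 pc = "Improper arrangement" := by
  intro t pc hp hk hne
  cases t with
  | nil => exact absurd rfl hne
  | cons c rest =>
      have hcp : c = '(' ∨ c = ')' := by
        simp only [List.all_cons, Bool.and_eq_true] at hp
        have := hp.1
        simp [pvIsParen] at this
        exact this
      rcases hcp with hc | hc
      · subst hc
        have hall := passB_allOpen ('(' :: rest) hp hk '(' rest rfl rfl
        exact goA_allOpen _ 0 pc hall (Or.inl (by simp)) le_rfl
      · subst hc
        simp [checkParensGoA]

-- the outer loop computes A's verdict
lemma goA_loop : ∀ (n : Nat) (t : List Char) (pc : Int), t.length ≤ n → t.all pvIsParen →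
    checkParensGoA t 0 pc =
      (if (reduceLoopB t pc).1 = [] then PySem.Int.toStr (reduceLoopB t pc).2 ++ " pairs"
       else "Improper arrangement") := by
  intro n
  induction n with
  | zero =>
      intro t pc hn hp
      have ht : t = [] := by cases t with | nil => rfl | cons c r => simp at hn
      subst ht
      rw [reduceLoopB]
      simp [passB, checkParensGoA]
  | succ m ih =>
      intro t pc hn hp
      rw [reduceLoopB]
      by_cases hk : (passB t).2 = 0
      · rw [if_pos hk]
        by_cases hne : t = []
        · subst hne; simp [checkParensGoA]
        · rw [goA_irreducible t pc hp hk hne]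
          simp [hne]
      · rw [if_neg hk]
        rw [goA_passB t 0 pc le_rfl]
        have hlt := passB_length t hk
        exact ih (passB t).1 (pc + (passB t).2) (by omega) (passB_paren t hp)

-- ===== VERDICT (by name: the statement is the Claim_ definition above) =====
theorem check_parentheses_spec : Claim_equal_check_parentheses := by
  intro s _
  unfold Spec_check_parentheses check_parentheses check_parentheses_alt
  rw [goA_filter]
  have hfun : (fun c => c == '(' || c == ')') = pvIsParen := rfl
  rw [hfun]
  rw [goA_loop (s.toList.filter pvIsParen).length _ 0 le_rfl
    (by simp [List.all_filter])]
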